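-- pv_equiv track=rewrite | github.com/Sholum1/MC102-2023-1-Semestre | Lab06/lab06.py | correlacao_cruzada
-- ===== SOURCE A (Python) =====
-- def correlacao_cruzada(vetor: list[int], mascara: list[int]) -> list[int]:
--     """Multiplica n elementos de um vetor, começando do elemento 0, pelos
--     elementos de um segundo vetor e soma esses produtos, tal que n é o tamanho
--     do segundo vetor, dai repete o processo começando do elemento 1, assim
--     sucessivamente até o que todos os elementos do primeiro vetor tenham
--     sofrido alguma operação pelo menos uma vez. Daí retorna uma lista com
--     os resultados, ordenados do primeiro ao último.
--
--     Parâmetros: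
--         vetor1  -- lista de números inteiros
--         mascara -- lista de números inteiros
--
--     Retorna:
--         list    -- resultados das operações
--     """
--     vetor_corrente = []
--
--     for i in range(len(vetor) - len(mascara) + 1):
--         soma = 0
--         for j in range(len(mascara)):
--             produto = vetor[i + j] * mascara[j]
--             soma += produto
--         vetor_corrente.append(soma)
--     return vetor_corrente
-- ===== SOURCE B (Python) =====
-- def correlacao_cruzada(vetor: list[int], mascara: list[int]) -> list[int]:
--     """Loop-interchanged cross-correlation: accumulates all window sums at once,
--     one mask position at a time."""
--     resultado = [0] * (len(vetor) - len(mascara) + 1)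
--     for j, mj in enumerate(mascara):
--         resultado = [r + mj * vetor[i + j] for i, r in enumerate(resultado)]
--     return resultado
-- ===== Notes on version B (the rewrite author's own statement) =====
-- stated objective: alternative
-- what changed: Loop nesting is interchanged: instead of finishing each window sum before the next, B keeps the whole array of partial window sums and sweeps it once per mask position, rebuilding it functionally with enumerate-comprehensions.
import Mathlib
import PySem

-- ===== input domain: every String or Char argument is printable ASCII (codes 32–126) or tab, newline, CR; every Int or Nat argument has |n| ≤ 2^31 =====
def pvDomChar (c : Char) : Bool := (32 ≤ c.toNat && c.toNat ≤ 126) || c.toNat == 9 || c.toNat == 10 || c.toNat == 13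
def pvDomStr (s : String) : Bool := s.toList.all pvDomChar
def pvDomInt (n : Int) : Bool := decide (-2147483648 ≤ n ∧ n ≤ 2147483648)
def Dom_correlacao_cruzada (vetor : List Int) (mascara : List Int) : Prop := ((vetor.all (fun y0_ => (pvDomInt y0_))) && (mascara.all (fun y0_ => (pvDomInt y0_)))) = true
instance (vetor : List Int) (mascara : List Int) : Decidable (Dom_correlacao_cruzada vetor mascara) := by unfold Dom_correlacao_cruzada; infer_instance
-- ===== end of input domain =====

-- B interchanges the loop nesting (mask-major accumulation of all partial window sums); alternative decomposition, same cost.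

-- ===== PORT A =====
-- window-by-window: for each output index i, an inner loop over the mask finishes soma before appending
def correlacao_cruzada (vetor : List Int) (mascara : List Int) : List Int :=
  (PySem.List.pyRange 0 ((vetor.length : Int) - (mascara.length : Int) + 1) 1).foldl
    (fun vetor_corrente i =>
      vetor_corrente ++
        [(PySem.List.pyRange 0 (mascara.length : Int) 1).foldl
           (fun soma j => soma + PySem.List.pyGetD vetor (i + j) 0 * PySem.List.pyGetD mascara j 0) 0])
    []

-- ===== PORT B =====
-- mask-major: resultado holds all partial window sums; each mask position sweeps it once
def correlacao_cruzada_alt (vetor : List Int) (mascara : List Int) : List Int :=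
  let resultado := List.replicate ((vetor.length : Int) - (mascara.length : Int) + 1).toNat 0
  (PySem.List.enumerate mascara 0).foldl
    (fun res jm =>
      (PySem.List.enumerate res 0).map
        (fun p => p.2 + jm.2 * PySem.List.pyGetD vetor (p.1 + jm.1) 0))
    resultado

-- ===== PRECONDITION & SPEC =====
def Spec_correlacao_cruzada (vetor : List Int) (mascara : List Int) (out : List Int) : Prop := out = correlacao_cruzada_alt vetor mascara
instance (vetor : List Int) (mascara : List Int) (out : List Int) : Decidable (Spec_correlacao_cruzada vetor mascara out) := by unfold Spec_correlacao_cruzada; infer_instance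

-- ===== CLAIM (what is proved, stated in full; the proofs are below) =====
def Claim_equal_correlacao_cruzada : Prop := ∀ (vetor : List Int) (mascara : List Int), Dom_correlacao_cruzada vetor mascara → Spec_correlacao_cruzada vetor mascara (correlacao_cruzada vetor mascara)

-- ===== LEMMAS AND PROOFS =====

-- window sum of mask ms against vetor starting at position i
def wsum (v : List Int) : List Int → Int → Int
  | [], _ => 0
  | a :: t, i => a * PySem.List.pyGetD v i 0 + wsum v t (i + 1)

-- enumerate of a mapped range lists the indices explicitly
theorem enum_range_map {α : Type} : ∀ (n : Nat) (s : Int) (g : Nat → α),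
    PySem.List.enumerate ((List.range n).map g) s
      = (List.range n).map (fun (k : Nat) => (s + (k : Int), g k)) := by
  intro n
  induction n with
  | zero => intro s g; simp
  | succ n ih =>
    intro s g
    rw [List.range_succ_eq_map]
    simp only [List.map_cons, List.map_map, PySem.List.enumerate_cons]
    rw [ih (s + 1) (g ∘ Nat.succ)]
    congr 1
    · simp
    · refine List.map_congr_left ?_
      intro k _
      simp only [Function.comp_apply, Nat.succ_eq_add_one, Prod.mk.injEq]
      constructor
      · push_cast; ring
      · trivial

-- inner loop of A computes wsum
theorem inner_eq (v : List Int) : ∀ (ms : List Int) (i s : Int),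
    (List.range ms.length).foldl
      (fun (acc : Int) (k : Nat) => acc + PySem.List.pyGetD v (i + (k : Int)) 0 * PySem.List.pyGetD ms (k : Int) 0) s
      = s + wsum v ms i := by
  intro ms
  induction ms with
  | nil => intro i s; simp [wsum]
  | cons a t ih =>
    intro i s
    rw [List.length_cons, List.range_succ_eq_map]
    simp only [List.foldl_cons, List.foldl_map]
    have h0 : PySem.List.pyGetD (a :: t) ((0 : Nat) : Int) 0 = a := by
      simp
    have hfun : (fun (acc : Int) (k : Nat) =>
        acc + PySem.List.pyGetD v (i + (↑(Nat.succ k) : Int)) 0 * PySem.List.pyGetD (a :: t) (↑(Nat.succ k) : Int) 0)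
        = (fun (acc : Int) (k : Nat) =>
        acc + PySem.List.pyGetD v ((i + 1) + (k : Int)) 0 * PySem.List.pyGetD t (k : Int) 0) := by
      funext acc k
      have h1 : PySem.List.pyGetD (a :: t) ((↑(k + 1) : Int)) 0 = PySem.List.pyGetD t (k : Int) 0 := by
        rw [PySem.List.pyGetD_natCast, PySem.List.pyGetD_natCast, List.getD_cons_succ]
      have h2 : i + (↑(k + 1) : Int) = (i + 1) + (k : Int) := by push_cast; ring
      simp only [Nat.succ_eq_add_one]
      rw [h1, h2]
    rw [hfun]
    rw [ih (i + 1) (s + PySem.List.pyGetD v (i + ((0:Nat) : Int)) 0 * PySem.List.pyGetD (a :: t) ((0:Nat) : Int) 0)]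
    rw [h0]
    simp [wsum]
    ring

-- B's fold maintains the array of partial window sums
theorem b_fold (v : List Int) : ∀ (ms : List Int) (j0 : Int) (n : Nat) (f : Int → Int),
    (PySem.List.enumerate ms j0).foldl
      (fun res jm =>
        (PySem.List.enumerate res 0).map
          (fun p => p.2 + jm.2 * PySem.List.pyGetD v (p.1 + jm.1) 0))
      ((List.range n).map (fun (k : Nat) => f (k : Int)))
      = (List.range n).map (fun (k : Nat) => f (k : Int) + wsum v ms ((k : Int) + j0)) := by
  intro ms
  induction ms with
  | nil =>
    intro j0 n f
    simp only [PySem.List.enumerate_nil, List.foldl_nil]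
    refine List.map_congr_left ?_
    intro k _; simp [wsum]
  | cons a t ih =>
    intro j0 n f
    rw [PySem.List.enumerate_cons, List.foldl_cons]
    rw [enum_range_map n 0 (fun (k : Nat) => f (k : Int))]
    rw [List.map_map]
    have hstep : ((fun p => p.2 + ((j0, a) : Int × Int).2 * PySem.List.pyGetD v (p.1 + ((j0, a) : Int × Int).1) 0) ∘
        (fun k : Nat => ((0 : Int) + (k : Int), f (k : Int))))
        = (fun k : Nat => (fun i => f i + a * PySem.List.pyGetD v (i + j0) 0) (k : Int)) := by
      funext k
      simp [Function.comp]
    rw [hstep, ih (j0 + 1) n (fun i => f i + a * PySem.List.pyGetD v (i + j0) 0)]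
    refine List.map_congr_left ?_
    intro k _
    simp only [wsum]
    have : (k : Int) + (j0 + 1) = ((k : Int) + j0) + 1 := by ring
    rw [this]
    ring

-- A equals the canonical map of window sums
theorem a_eq (v m : List Int) :
    correlacao_cruzada v m
      = (List.range ((v.length : Int) - (m.length : Int) + 1).toNat).map
          (fun (k : Nat) => wsum v m (k : Int)) := by
  unfold correlacao_cruzada
  rw [PySem.List.foldl_append_singleton_eq_map, List.nil_append,
      PySem.List.pyRange_one 0 ((v.length : Int) - (m.length : Int) + 1), List.map_map]
  simp only [sub_zero]
  refine List.map_congr_left ?_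
  intro k _
  simp only [Function.comp_apply, zero_add]
  rw [PySem.List.pyRange_one 0 (m.length : Int)]
  simp only [sub_zero, Int.toNat_natCast, List.foldl_map, zero_add]
  exact (inner_eq v m (k : Int) 0).trans (by simp)

-- B equals the same canonical map
theorem b_eq (v m : List Int) :
    correlacao_cruzada_alt v m
      = (List.range ((v.length : Int) - (m.length : Int) + 1).toNat).map
          (fun (k : Nat) => wsum v m (k : Int)) := by
  unfold correlacao_cruzada_alt
  have hrep : List.replicate ((v.length : Int) - (m.length : Int) + 1).toNat (0 : Int)
      = (List.range ((v.length : Int) - (m.length : Int) + 1).toNat).map (fun _ => (0 : Int)) := by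
    rw [List.map_const', List.length_range]
  simp only
  rw [hrep]
  rw [b_fold v m 0 _ (fun _ => (0 : Int))]
  refine List.map_congr_left ?_
  intro k _
  simp

-- ===== VERDICT (by name: the statement is the Claim_ definition above) =====
theorem correlacao_cruzada_spec : Claim_equal_correlacao_cruzada := by
  intro v m _
  unfold Spec_correlacao_cruzada
  rw [a_eq, b_eq]
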